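-- pv_equiv track=rewrite | github.com/Nghia03092004/nghia03092004.github.io | project_euler_unified/problem_931/solution.py | solve
-- ===== SOURCE A (Python) =====
-- def solve(N=10**7, MOD=10**9 + 7):
--     """Compute sum_{n=1}^{N} R(n) mod MOD via rad sieve."""
--     rad = [1] * (N + 1)
--     is_prime = [True] * (N + 1)
--     for p in range(2, N + 1):
--         if is_prime[p]:
--             for m in range(p, N + 1, p):
--                 rad[m] *= p
--                 if m > p:
--                     is_prime[m] = False
--     S = 0
--     for d in range(1, N + 1):
--         S = (S + rad[d] * (N // d)) % MOD
--     return S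
-- ===== SOURCE B (Python) =====
-- def solve(N=10**7, MOD=10**9 + 7):
--     """Compute sum_{n=1}^{N} R(n) mod MOD: same rad sieve, then prefix sums of
--     rad and a harmonic quotient-block loop instead of the per-d modded sum."""
--     rad = [1] * (N + 1)
--     is_prime = [True] * (N + 1)
--     for p in range(2, N + 1):
--         if is_prime[p]:
--             for m in range(p, N + 1, p):
--                 rad[m] *= p
--                 if m > p:
--                     is_prime[m] = False
--     pref = [0]
--     s = 0
--     for d in range(1, N + 1):
--         s += rad[d]
--         pref.append(s)
--     S = 0
--     d = 1
--     while d <= N: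
--         q = N // d
--         d2 = N // q
--         S += q * (pref[d2] - pref[d - 1])
--         d = d2 + 1
--     return S % MOD
-- ===== Notes on version B (the rewrite author's own statement) =====
-- stated objective: alternative
-- what changed: The summation stage is replaced: instead of accumulating rad[d]*(N//d) with a mod at every step, B builds prefix sums of rad and evaluates the sum with a harmonic quotient-block while-loop (O(sqrt N) blocks with constant N//d per block), taking the mod once at the end.
-- outside the precondition, e.g. on solve(0, 0): A returns 0, B raises ZeroDivisionError
import Mathlib
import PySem

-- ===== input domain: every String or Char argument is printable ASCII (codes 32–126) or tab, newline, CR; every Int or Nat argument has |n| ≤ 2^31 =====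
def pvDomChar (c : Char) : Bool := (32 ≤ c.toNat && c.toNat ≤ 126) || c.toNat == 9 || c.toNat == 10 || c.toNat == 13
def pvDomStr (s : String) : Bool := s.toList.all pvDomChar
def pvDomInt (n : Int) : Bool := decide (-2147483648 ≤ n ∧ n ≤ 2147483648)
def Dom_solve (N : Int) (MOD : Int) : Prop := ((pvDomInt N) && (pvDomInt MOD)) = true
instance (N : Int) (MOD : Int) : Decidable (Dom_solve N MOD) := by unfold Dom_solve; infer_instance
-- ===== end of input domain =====

-- B keeps A's rad sieve but replaces the per-d 'rad[d]*(N//d) mod MOD' accumulation by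
-- prefix sums of rad and a harmonic quotient-block loop; objective: alternative.

-- ===== PORT A =====
def solve (N : Int) (MOD : Int) : Int :=
  let rad : List Int := List.replicate (N + 1).toNat 1
  let is_prime : List Bool := List.replicate (N + 1).toNat true
  let st := (PySem.List.pyRange 2 (N + 1) 1).foldl (fun (st : List Int × List Bool) p =>
      if PySem.List.pyGetD st.2 p false then
        (PySem.List.pyRange p (N + 1) p).foldl (fun st2 m =>
          (PySem.List.pySetD st2.1 m (PySem.List.pyGetD st2.1 m 0 * p),
           if m > p then PySem.List.pySetD st2.2 m false else st2.2)) st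
      else st) (rad, is_prime)
  (PySem.List.pyRange 1 (N + 1) 1).foldl (fun S d =>
      PySem.Int.mod (S + PySem.List.pyGetD st.1 d 0 * PySem.Int.floordiv N d) MOD) 0

-- ===== PORT B =====
-- Source B's 'while d <= N' block loop; the fuel only bounds the recursion and is never
-- exhausted on the actual call (each step moves d to N//(N//d) + 1 > d)
def pvWhile (N : Int) (pref : List Int) : Nat → Int → Int → Int
  | 0, _, S => S
  | fuel + 1, d, S =>
    if d ≤ N then
      let q := PySem.Int.floordiv N d
      let d2 := PySem.Int.floordiv N q
      pvWhile N pref fuel (d2 + 1)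
        (S + q * (PySem.List.pyGetD pref d2 0 - PySem.List.pyGetD pref (d - 1) 0))
    else S

def solve_alt (N : Int) (MOD : Int) : Int :=
  let rad : List Int := List.replicate (N + 1).toNat 1
  let is_prime : List Bool := List.replicate (N + 1).toNat true
  let st := (PySem.List.pyRange 2 (N + 1) 1).foldl (fun (st : List Int × List Bool) p =>
      if PySem.List.pyGetD st.2 p false then
        (PySem.List.pyRange p (N + 1) p).foldl (fun st2 m =>
          (PySem.List.pySetD st2.1 m (PySem.List.pyGetD st2.1 m 0 * p),
           if m > p then PySem.List.pySetD st2.2 m false else st2.2)) st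
      else st) (rad, is_prime)
  let pc := (PySem.List.pyRange 1 (N + 1) 1).foldl (fun (acc : Int × List Int) d =>
      let s := acc.1 + PySem.List.pyGetD st.1 d 0
      (s, acc.2 ++ [s])) (0, [0])
  PySem.Int.mod (pvWhile N pc.2 (N.toNat + 1) 1 0) MOD

-- ===== PRECONDITION & SPEC =====
-- Pre_ excludes MOD = 0: there Python A raises ZeroDivisionError whenever N ≥ 1, and for
-- N < 1 A only returns the degenerate 0 because its loop never runs, while B's single
-- final '% MOD' raises; B's port is not claimed there.
def Pre_solve (N : Int) (MOD : Int) : Prop := MOD ≠ 0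
instance (N : Int) (MOD : Int) : Decidable (Pre_solve N MOD) := by unfold Pre_solve; infer_instance
def pvWitness_solve : Int × Int := (6, 1000000007)

def Spec_solve (N : Int) (MOD : Int) (out : Int) : Prop := out = solve_alt N MOD
instance (N : Int) (MOD : Int) (out : Int) : Decidable (Spec_solve N MOD out) := by unfold Spec_solve; infer_instance

-- ===== CLAIM (what is proved, stated in full; the proofs are below) =====
def Claim_equal_solve : Prop := ∀ (N : Int) (MOD : Int), Dom_solve N MOD → Pre_solve N MOD → Spec_solve N MOD (solve N MOD)

-- ===== LEMMAS AND PROOFS =====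

-- prefix sum of f over 1..e
def pvPsum (f : Int → Int) (e : Int) : Int := ((PySem.List.pyRange 1 (e + 1) 1).map f).sum

theorem pv_psum_zero (f : Int → Int) : pvPsum f 0 = 0 := by
  simp [pvPsum, PySem.List.pyRange_one_eq_nil]

theorem pv_psum_succ (f : Int → Int) (a : Int) (ha : 1 ≤ a) :
    pvPsum f a = pvPsum f (a - 1) + f a := by
  have h : a - 1 + 1 = a := by omega
  unfold pvPsum
  rw [PySem.List.pyRange_one_succ_right (by omega : (1:Int) ≤ a), h]
  simp

theorem pv_psum_block (f : Int → Int) (a b : Int) (ha : 1 ≤ a) (hab : a ≤ b + 1) :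
    ((PySem.List.pyRange a (b + 1) 1).map f).sum = pvPsum f b - pvPsum f (a - 1) := by
  have h : a - 1 + 1 = a := by omega
  unfold pvPsum
  rw [PySem.List.pyRange_one_append 1 a (b + 1) (by omega) hab, h]
  simp

-- the prefix-sum building loop
theorem pv_pref_build (f : Int → Int) (N : Int) : ∀ (n : Nat) (a : Int) (acc : List Int),
    1 ≤ a → a ≤ N + 1 → (N + 1 - a).toNat = n →
    (PySem.List.pyRange a (N + 1) 1).foldl (fun (acc : Int × List Int) d =>
        let s := acc.1 + f d
        (s, acc.2 ++ [s])) (pvPsum f (a - 1), acc)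
      = (pvPsum f N, acc ++ (PySem.List.pyRange a (N + 1) 1).map (pvPsum f)) := by
  intro n
  induction n with
  | zero =>
    intro a acc h1 h2 h3
    have ha : a = N + 1 := by omega
    rw [PySem.List.pyRange_one_eq_nil (by omega)]
    have hb : a - 1 = N := by omega
    simp [hb]
  | succ n ih =>
    intro a acc h1 h2 h3
    have hlt : a < N + 1 := by omega
    rw [PySem.List.pyRange_one_cons hlt]
    simp only [List.foldl_cons, List.map_cons]
    have hs : pvPsum f (a - 1) + f a = pvPsum f a := (pv_psum_succ f a h1).symm
    rw [hs]
    have hrec := ih (a + 1) (acc ++ [pvPsum f a]) (by omega) (by omega) (by omega)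
    rw [show a + 1 - 1 = a by ring] at hrec
    rw [hrec]
    simp

-- lookups into the built prefix list
theorem pv_pref_getD (f : Int → Int) (N : Int) (e : Int) (h0 : 0 ≤ e) (he : e ≤ N) :
    PySem.List.pyGetD ([0] ++ (PySem.List.pyRange 1 (N + 1) 1).map (pvPsum f)) e 0
      = pvPsum f e := by
  have hlen : ((PySem.List.pyRange 1 (N + 1) 1).map (pvPsum f)).length = N.toNat := by
    rw [List.length_map, PySem.List.length_pyRange_one]; omega
  have hcast : e = ((e.toNat : Nat) : Int) := (Int.toNat_of_nonneg h0).symm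
  rw [hcast, PySem.List.pyGetD_natCast]
  cases hk : e.toNat with
  | zero =>
    simp [pv_psum_zero]
  | succ k =>
    have hklt : k < ((PySem.List.pyRange 1 (N + 1) 1).map (pvPsum f)).length := by
      rw [hlen]; omega
    rw [List.singleton_append, List.getD_cons_succ]
    rw [List.getD_eq_getElem _ _ hklt, List.getElem_map, PySem.List.getElem_pyRange_one]
    congr 1
    omega

-- the quotient-block while loop computes the full weighted sum
theorem pv_while_eq (N : Int) (f : Int → Int) (pref : List Int)
    (hpref : ∀ e : Int, 0 ≤ e → e ≤ N → PySem.List.pyGetD pref e 0 = pvPsum f e) :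
    ∀ (fuel : Nat) (d S : Int), 1 ≤ d → (N + 1 - d).toNat ≤ fuel →
    pvWhile N pref fuel d S
      = S + ((PySem.List.pyRange d (N + 1) 1).map (fun e => f e * PySem.Int.floordiv N e)).sum := by
  intro fuel
  induction fuel with
  | zero =>
    intro d S hd hf
    have : N + 1 ≤ d := by omega
    rw [PySem.List.pyRange_one_eq_nil this]
    simp [pvWhile]
  | succ fuel ih =>
    intro d S hd hf
    simp only [pvWhile]
    by_cases hdN : d ≤ N
    · rw [if_pos hdN]
      set q := PySem.Int.floordiv N d with hqdef
      set d2 := PySem.Int.floordiv N q with hd2def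
      have hq := (PySem.Int.floordiv_eq_iff_of_pos (by omega : (0:Int) < d)).mp hqdef.symm
      have hq1 : 1 ≤ q := by nlinarith [hq.1, hq.2]
      have hd2 := (PySem.Int.floordiv_eq_iff_of_pos (by omega : (0:Int) < q)).mp hd2def.symm
      have hdd2 : d ≤ d2 := by nlinarith [hq.1, hd2.2]
      have hd2N : d2 ≤ N := by nlinarith [hd2.1]
      -- split the remaining range at d2 + 1
      rw [PySem.List.pyRange_one_append d (d2 + 1) (N + 1) (by omega) (by omega),
          List.map_append, List.sum_append]
      -- on the block, N // e is constantly q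
      have hblock : (PySem.List.pyRange d (d2 + 1) 1).map (fun e => f e * PySem.Int.floordiv N e)
          = (PySem.List.pyRange d (d2 + 1) 1).map (fun e => f e * q) := by
        apply List.map_congr_left
        intro e hme
        rw [PySem.List.mem_pyRange_one] at hme
        have hfe : PySem.Int.floordiv N e = q := by
          rw [PySem.Int.floordiv_eq_iff_of_pos (by omega : (0:Int) < e)]
          constructor
          · nlinarith [hd2.1]
          · nlinarith [hq.2]
        rw [hfe]
      rw [hblock]
      have hmul : ((PySem.List.pyRange d (d2 + 1) 1).map (fun e => f e * q)).sum
          = ((PySem.List.pyRange d (d2 + 1) 1).map f).sum * q := by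
        rw [← List.sum_map_mul_right]
      rw [hmul, pv_psum_block f d d2 (by omega) (by omega)]
      rw [hpref d2 (by omega) hd2N, hpref (d - 1) (by omega) (by omega)]
      rw [ih (d2 + 1) _ (by omega) (by omega)]
      ring
    · rw [if_neg hdN]
      rw [PySem.List.pyRange_one_eq_nil (by omega)]
      simp

-- A's running-mod loop is the plain sum modded once
theorem pv_modfold (L : List Int) (f : Int → Int) (M : Int) : ∀ s : Int,
    L.foldl (fun S d => PySem.Int.mod (S + f d) M) (Int.fmod s M)
      = Int.fmod (s + (L.map f).sum) M := by
  induction L with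
  | nil => intro s; simp [PySem.Int.mod]
  | cons a L ih =>
    intro s
    rw [List.foldl_cons,
        show PySem.Int.mod (Int.fmod s M + f a) M = Int.fmod (s + f a) M from
          Int.fmod_add_fmod s M (f a),
        ih (s + f a)]
    simp only [List.map_cons, List.sum_cons]
    ring_nf

-- let-free restatements of the two ports (definitional)
theorem pv_solve_flat (N MOD : Int) : solve N MOD =
    (PySem.List.pyRange 1 (N + 1) 1).foldl (fun S d =>
      PySem.Int.mod (S + PySem.List.pyGetD
        (((PySem.List.pyRange 2 (N + 1) 1).foldl (fun (st : List Int × List Bool) p =>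
            if PySem.List.pyGetD st.2 p false then
              (PySem.List.pyRange p (N + 1) p).foldl (fun st2 m =>
                (PySem.List.pySetD st2.1 m (PySem.List.pyGetD st2.1 m 0 * p),
                 if m > p then PySem.List.pySetD st2.2 m false else st2.2)) st
            else st)
          (List.replicate (N + 1).toNat (1 : Int), List.replicate (N + 1).toNat true)).1)
        d 0 * PySem.Int.floordiv N d) MOD) 0 := rfl

theorem pv_solve_alt_flat (N MOD : Int) : solve_alt N MOD =
    PySem.Int.mod (pvWhile N
      ((PySem.List.pyRange 1 (N + 1) 1).foldl (fun (acc : Int × List Int) d =>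
          (acc.1 + PySem.List.pyGetD
            (((PySem.List.pyRange 2 (N + 1) 1).foldl (fun (st : List Int × List Bool) p =>
                if PySem.List.pyGetD st.2 p false then
                  (PySem.List.pyRange p (N + 1) p).foldl (fun st2 m =>
                    (PySem.List.pySetD st2.1 m (PySem.List.pyGetD st2.1 m 0 * p),
                     if m > p then PySem.List.pySetD st2.2 m false else st2.2)) st
                else st)
              (List.replicate (N + 1).toNat (1 : Int), List.replicate (N + 1).toNat true)).1)
            d 0,
           acc.2 ++ [acc.1 + PySem.List.pyGetD
            (((PySem.List.pyRange 2 (N + 1) 1).foldl (fun (st : List Int × List Bool) p =>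
                if PySem.List.pyGetD st.2 p false then
                  (PySem.List.pyRange p (N + 1) p).foldl (fun st2 m =>
                    (PySem.List.pySetD st2.1 m (PySem.List.pyGetD st2.1 m 0 * p),
                     if m > p then PySem.List.pySetD st2.2 m false else st2.2)) st
                else st)
              (List.replicate (N + 1).toNat (1 : Int), List.replicate (N + 1).toNat true)).1)
            d 0])) (0, [0])).2
      (N.toNat + 1) 1 0) MOD := rfl

-- ===== VERDICT (by name: the statement is the Claim_ definition above) =====
theorem solve_spec : Claim_equal_solve := by
  intro N MOD _hDom _hPre
  unfold Spec_solve
  rw [pv_solve_flat, pv_solve_alt_flat]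
  set rad := ((PySem.List.pyRange 2 (N + 1) 1).foldl (fun (st : List Int × List Bool) p =>
      if PySem.List.pyGetD st.2 p false then
        (PySem.List.pyRange p (N + 1) p).foldl (fun st2 m =>
          (PySem.List.pySetD st2.1 m (PySem.List.pyGetD st2.1 m 0 * p),
           if m > p then PySem.List.pySetD st2.2 m false else st2.2)) st
      else st)
    (List.replicate (N + 1).toNat (1 : Int), List.replicate (N + 1).toNat true)).1 with hrad
  set f : Int → Int := fun d => PySem.List.pyGetD rad d 0 with hf
  -- A side
  have hA : (PySem.List.pyRange 1 (N + 1) 1).foldl (fun S d =>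
        PySem.Int.mod (S + f d * PySem.Int.floordiv N d) MOD) 0
      = Int.fmod (((PySem.List.pyRange 1 (N + 1) 1).map
          (fun d => f d * PySem.Int.floordiv N d)).sum) MOD := by
    have h := pv_modfold (PySem.List.pyRange 1 (N + 1) 1)
      (fun d => f d * PySem.Int.floordiv N d) MOD 0
    rw [Int.zero_fmod] at h
    rw [h, zero_add]
  by_cases hN : 0 ≤ N
  · -- B's prefix list
    have hz : pvPsum f (1 - 1) = 0 := by norm_num [pv_psum_zero]
    have hbuild := pv_pref_build f N N.toNat 1 [0] (by omega) (by omega) (by omega)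
    rw [hz] at hbuild
    have hpc : ((PySem.List.pyRange 1 (N + 1) 1).foldl (fun (acc : Int × List Int) d =>
        (acc.1 + f d, acc.2 ++ [acc.1 + f d])) ((0 : Int), ([0] : List Int))).2
        = [0] ++ (PySem.List.pyRange 1 (N + 1) 1).map (pvPsum f) := by
      rw [hbuild]
    have hpref : ∀ e : Int, 0 ≤ e → e ≤ N →
        PySem.List.pyGetD ([0] ++ (PySem.List.pyRange 1 (N + 1) 1).map (pvPsum f)) e 0
          = pvPsum f e := fun e h0 he => pv_pref_getD f N e h0 he
    have hwhile := pv_while_eq N f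
      ([0] ++ (PySem.List.pyRange 1 (N + 1) 1).map (pvPsum f)) hpref
      (N.toNat + 1) 1 0 (by omega) (by omega)
    rw [hA, hpc, hwhile, zero_add]
    rfl
  · -- N < 0: the loops are empty and the while guard fails immediately on d = 1
    have hnil : PySem.List.pyRange 1 (N + 1) 1 = [] :=
      PySem.List.pyRange_one_eq_nil (by omega)
    rw [hnil]
    have hT : N.toNat + 1 = 0 + 1 := by omega
    rw [hT]
    simp only [List.foldl_nil, pvWhile]
    rw [if_neg (by omega)]
    simp [PySem.Int.mod]
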